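-- pv_equiv track=rewrite | github.com/Junhee8649/BaekjoonPython | Baekjoon/src/14500.py | tetromino_one
-- ===== SOURCE A (Python) =====
-- def tetromino_one(paper,N,M):
--     max_sum = 0
--     for i in range(N):
--         for j in range(M-3):
--             max_sum = max(max_sum, sum(paper[i][j:j+4]))
--     for i in range(N-3):
--         for j in range(M):
--             max_sum = max(max_sum, paper[i][j] + paper[i+1][j] + paper[i+2][j] + paper[i+3][j])
--     return max_sum
-- ===== SOURCE B (Python) =====
-- def tetromino_one(paper, N, M):
--     best = 0
--     # horizontal 4-windows via per-row prefix sums: window = pref[j+4]-pref[j]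
--     for i in range(N):
--         pref = [0]
--         for x in paper[i]:
--             pref.append(pref[-1] + x)
--         for j in range(M - 3):
--             best = max(best, pref[j + 4] - pref[j])
--     # vertical 4-windows via a cumulative column-sum table (only possible when N >= 4)
--     if N >= 4:
--         col = [[0] * M]
--         for i in range(N):
--             prev = col[-1]
--             col.append([prev[j] + paper[i][j] for j in range(M)])
--         for i in range(N - 3):
--             for j in range(M):
--                 best = max(best, col[i + 4][j] - col[i][j])
--     return best
-- ===== Notes on version B (the rewrite author's own statement) =====
-- stated objective: alternative
-- what changed: B replaces A's re-summing of every 4-cell window (a 4-element slice sum per horizontal window, four indexed adds per vertical window) with materialized prefix-sum tables: a per-row prefix list for horizontal windows and a cumulative column-sum table for vertical windows, each window becoming one O(1) subtraction.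
-- outside the precondition, e.g. on tetromino_one([[1, 2, 3, 4, 5]], 1, 6): A returns 14, B raises IndexError; on tetromino_one([[1, 2, 3, 4], [5]], 2, 4): A returns 10, B raises IndexError
import Mathlib
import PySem

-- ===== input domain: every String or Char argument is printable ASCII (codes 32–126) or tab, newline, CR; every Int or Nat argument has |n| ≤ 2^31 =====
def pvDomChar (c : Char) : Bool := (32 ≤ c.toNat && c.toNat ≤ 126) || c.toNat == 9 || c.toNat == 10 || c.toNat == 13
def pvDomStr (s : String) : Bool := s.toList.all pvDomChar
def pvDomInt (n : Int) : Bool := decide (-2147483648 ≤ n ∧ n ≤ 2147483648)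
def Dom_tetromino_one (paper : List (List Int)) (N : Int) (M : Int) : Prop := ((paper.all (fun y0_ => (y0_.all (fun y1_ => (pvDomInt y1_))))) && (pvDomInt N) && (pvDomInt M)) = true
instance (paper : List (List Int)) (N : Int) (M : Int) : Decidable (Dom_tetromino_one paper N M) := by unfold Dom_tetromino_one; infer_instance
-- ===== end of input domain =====

-- B replaces A's per-window re-summing with prefix-sum tables (per-row prefix lists and a
-- cumulative column-sum table); each 4-cell window becomes one subtraction (objective: alternative).

-- ===== PORT A =====
def tetromino_one (paper : List (List Int)) (N : Int) (M : Int) : Int :=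
  let max_sum : Int := 0
  let max_sum := (PySem.List.pyRange 0 N).foldl (fun max_sum i =>
    (PySem.List.pyRange 0 (M - 3)).foldl (fun max_sum j =>
      max max_sum (PySem.List.slice (PySem.List.pyGetD paper i []) (some j) (some (j + 4))).sum) max_sum) max_sum
  let max_sum := (PySem.List.pyRange 0 (N - 3)).foldl (fun max_sum i =>
    (PySem.List.pyRange 0 M).foldl (fun max_sum j =>
      max max_sum (PySem.List.pyGetD (PySem.List.pyGetD paper i []) j 0
        + PySem.List.pyGetD (PySem.List.pyGetD paper (i + 1) []) j 0
        + PySem.List.pyGetD (PySem.List.pyGetD paper (i + 2) []) j 0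
        + PySem.List.pyGetD (PySem.List.pyGetD paper (i + 3) []) j 0)) max_sum) max_sum
  max_sum

-- ===== PORT B =====
def tetromino_one_alt (paper : List (List Int)) (N : Int) (M : Int) : Int :=
  let best : Int := 0
  let best := (PySem.List.pyRange 0 N).foldl (fun best i =>
    let row := PySem.List.pyGetD paper i []
    let pref := row.foldl (fun pref x => pref ++ [PySem.List.pyGetD pref (-1) 0 + x]) [0]
    (PySem.List.pyRange 0 (M - 3)).foldl (fun best j =>
      max best (PySem.List.pyGetD pref (j + 4) 0 - PySem.List.pyGetD pref j 0)) best) best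
  if 4 ≤ N then
    let col := (PySem.List.pyRange 0 N).foldl (fun col i =>
      let prev := PySem.List.pyGetD col (-1) []
      col ++ [(PySem.List.pyRange 0 M).map (fun j =>
        PySem.List.pyGetD prev j 0 + PySem.List.pyGetD (PySem.List.pyGetD paper i []) j 0)])
      [List.replicate M.toNat 0]
    (PySem.List.pyRange 0 (N - 3)).foldl (fun best i =>
      (PySem.List.pyRange 0 M).foldl (fun best j =>
        max best (PySem.List.pyGetD (PySem.List.pyGetD col (i + 4) []) j 0
          - PySem.List.pyGetD (PySem.List.pyGetD col i []) j 0)) best) best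
  else best

-- ===== PRECONDITION & SPEC =====
-- Pre_ admits every N ≤ 0 and otherwise requires the first N rows to exist and (whenever any
-- 4-window is in range) to have length ≥ M; it excludes only the shape-mismatched inputs (ragged
-- rows, N > len(paper)) on which A's forgiving slices/empty ranges may still return a value but
-- B's prefix tables raise IndexError.
def Pre_tetromino_one (paper : List (List Int)) (N : Int) (M : Int) : Prop :=
  N ≤ 0 ∨ (N ≤ (paper.length : Int) ∧
    ((4 ≤ M ∨ (4 ≤ N ∧ 1 ≤ M)) → ∀ row ∈ paper.take N.toNat, M ≤ (row.length : Int)))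
instance (paper : List (List Int)) (N : Int) (M : Int) : Decidable (Pre_tetromino_one paper N M) := by
  unfold Pre_tetromino_one; infer_instance

def pvWitness_tetromino_one : List (List Int) × Int × Int :=
  ([[1, 2, 3, 4], [5, 6, 7, 8], [-1, -2, -3, -4], [2, 2, 2, 2]], 4, 4)

def Spec_tetromino_one (paper : List (List Int)) (N : Int) (M : Int) (out : Int) : Prop := out = tetromino_one_alt paper N M
instance (paper : List (List Int)) (N : Int) (M : Int) (out : Int) : Decidable (Spec_tetromino_one paper N M out) := by unfold Spec_tetromino_one; infer_instance

-- ===== CLAIM (what is proved, stated in full; the proofs are below) =====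
def Claim_equal_tetromino_one : Prop := ∀ (paper : List (List Int)) (N : Int) (M : Int), Dom_tetromino_one paper N M → Pre_tetromino_one paper N M → Spec_tetromino_one paper N M (tetromino_one paper N M)

-- ===== LEMMAS AND PROOFS =====

-- the prefix list B builds for a row is the list of partial sums
lemma pref_fold (row : List Int) :
    row.foldl (fun pref x => pref ++ [PySem.List.pyGetD pref (-1) 0 + x]) [0]
      = (List.range (row.length + 1)).map (fun k => ((row.take k).sum)) := by
  induction row using List.reverseRecOn with
  | nil => simp
  | append_singleton row x ih =>
    rw [List.foldl_append, ih]
    simp only [List.foldl_cons, List.foldl_nil]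
    have hlen : (row ++ [x]).length = row.length + 1 := by simp
    rw [hlen, List.range_succ (n := row.length + 1), List.map_append]
    have h1 : (List.range (row.length + 1)).map (fun k => ((row ++ [x]).take k).sum)
        = (List.range (row.length + 1)).map (fun k => (row.take k).sum) := by
      apply List.map_congr_left
      intro k hk
      rw [List.take_append_of_le_length (by simpa using Nat.lt_succ_iff.mp (List.mem_range.mp hk))]
    have h2 : PySem.List.pyGetD ((List.range (row.length + 1)).map (fun k => (row.take k).sum)) (-1) 0 = row.sum := by
      rw [List.range_succ, List.map_append]
      simp [PySem.List.pyGetD_neg_one_append_singleton]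
    rw [h1, h2]
    simp

-- the cumulative column-sum table B builds holds the column partial sums of the first k rows
lemma col_fold (paper : List (List Int)) (M : Int) (n : Nat) (hn : n ≤ paper.length) :
    (PySem.List.pyRange 0 (n : Int)).foldl (fun col i =>
        col ++ [(PySem.List.pyRange 0 M).map (fun j =>
          PySem.List.pyGetD (PySem.List.pyGetD col (-1) []) j 0
            + PySem.List.pyGetD (PySem.List.pyGetD paper i []) j 0)])
      [List.replicate M.toNat 0]
    = (List.range (n + 1)).map (fun k => (PySem.List.pyRange 0 M).map (fun j =>
        ((paper.take k).map (fun r => PySem.List.pyGetD r j 0)).sum)) := by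
  induction n with
  | zero =>
    simp only [Nat.cast_zero, PySem.List.pyRange_one_eq_nil (le_refl 0), List.foldl_nil,
      List.range_succ, List.range_zero, List.map_nil, List.nil_append, List.map_cons,
      List.take_zero]
    congr 1
    simp only [List.sum_nil, List.map_const', PySem.List.length_pyRange_one]
    norm_num
  | succ n ih =>
    have hn' : n ≤ paper.length := by omega
    have hcast : ((n + 1 : Nat) : Int) = (n : Int) + 1 := by push_cast; ring
    rw [hcast, PySem.List.pyRange_one_succ_right (by positivity), List.foldl_append, ih hn']
    simp only [List.foldl_cons, List.foldl_nil]
    have hlast : PySem.List.pyGetD ((List.range (n + 1)).map (fun k => (PySem.List.pyRange 0 M).map (fun j =>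
        ((paper.take k).map (fun r => PySem.List.pyGetD r j 0)).sum))) (-1) []
        = (PySem.List.pyRange 0 M).map (fun j => ((paper.take n).map (fun r => PySem.List.pyGetD r j 0)).sum) := by
      rw [List.range_succ, List.map_append]
      simp [PySem.List.pyGetD_neg_one_append_singleton]
    rw [hlast]
    have hrow : (PySem.List.pyRange 0 M).map (fun j =>
          PySem.List.pyGetD ((PySem.List.pyRange 0 M).map (fun j' =>
            ((paper.take n).map (fun r => PySem.List.pyGetD r j' 0)).sum)) j 0
          + PySem.List.pyGetD (PySem.List.pyGetD paper (n : Int) []) j 0)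
        = (PySem.List.pyRange 0 M).map (fun j =>
            ((paper.take (n + 1)).map (fun r => PySem.List.pyGetD r j 0)).sum) := by
      apply List.map_congr_left
      intro j hj
      obtain ⟨h0, h1⟩ := (PySem.List.mem_pyRange_one).mp hj
      rw [PySem.List.pyGetD_map_pyRange_of_nonneg _ M j 0 h0 h1]
      have hpn : PySem.List.pyGetD paper (n : Int) [] = paper[n] := by
        rw [PySem.List.pyGetD_natCast]
        exact List.getD_eq_getElem _ _ (by omega)
      have htake : List.take (n + 1) paper = List.take n paper ++ [paper[n]] := by
        rw [List.take_add_one, List.getElem?_eq_getElem (by omega)]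
        rfl
      rw [hpn, htake, List.map_append, List.sum_append]
      simp
    rw [hrow, List.range_succ (n := n + 1), List.map_append]
    simp

-- a 4-window as a difference of partial sums
lemma window_sum (row : List Int) (t : Nat) :
    (row.take (t + 4)).sum - (row.take t).sum = ((row.drop t).take 4).sum := by
  rw [List.take_add, List.sum_append]; ring

-- a vertical 4-window as a difference of mapped partial sums
lemma four_window (l : List (List Int)) (f : List Int → Int) (t : Nat) (h : t + 4 ≤ l.length) :
    ((l.take (t + 4)).map f).sum - ((l.take t).map f).sum
      = f (l.getD t []) + f (l.getD (t+1) []) + f (l.getD (t+2) []) + f (l.getD (t+3) []) := by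
  have h0 : t < l.length := by omega
  have h1 : t + 1 < l.length := by omega
  have h2 : t + 2 < l.length := by omega
  have h3 : t + 3 < l.length := by omega
  have hdrop : (l.drop t).take 4 = [l[t], l[t+1], l[t+2], l[t+3]] := by
    rw [List.drop_eq_getElem_cons h0, List.drop_eq_getElem_cons h1,
        List.drop_eq_getElem_cons h2, List.drop_eq_getElem_cons h3]
    rfl
  rw [List.take_add, List.map_append, List.sum_append, hdrop]
  simp [List.getD, h0, h1, h2, h3]
  ring

-- ===== VERDICT (by name: the statement is the Claim_ definition above) =====
theorem tetromino_one_spec : Claim_equal_tetromino_one := by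
  intro paper N M _hdom hpre
  unfold Spec_tetromino_one
  simp only [tetromino_one, tetromino_one_alt]
  by_cases hN : N ≤ 0
  · -- every loop range is empty on both sides
    rw [PySem.List.pyRange_one_eq_nil hN, PySem.List.pyRange_one_eq_nil (show N - 3 ≤ 0 by omega),
        if_neg (show ¬ (4 ≤ N) by omega)]
    simp only [List.foldl_nil]
  · obtain ⟨hNlen, hneed⟩ : N ≤ (paper.length : Int) ∧
        ((4 ≤ M ∨ (4 ≤ N ∧ 1 ≤ M)) → ∀ row ∈ paper.take N.toNat, M ≤ (row.length : Int)) := by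
      rcases hpre with h | h
      · omega
      · exact h
    -- the horizontal folds agree
    have hh : ∀ init : Int,
        (PySem.List.pyRange 0 N).foldl (fun max_sum i =>
          (PySem.List.pyRange 0 (M - 3)).foldl (fun max_sum j =>
            max max_sum (PySem.List.slice (PySem.List.pyGetD paper i []) (some j) (some (j + 4))).sum) max_sum) init
      = (PySem.List.pyRange 0 N).foldl (fun best i =>
          (PySem.List.pyRange 0 (M - 3)).foldl (fun best j =>
            max best (PySem.List.pyGetD ((PySem.List.pyGetD paper i []).foldl
                (fun pref x => pref ++ [PySem.List.pyGetD pref (-1) 0 + x]) [0]) (j + 4) 0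
              - PySem.List.pyGetD ((PySem.List.pyGetD paper i []).foldl
                (fun pref x => pref ++ [PySem.List.pyGetD pref (-1) 0 + x]) [0]) j 0)) best) init := by
      intro init
      apply PySem.List.foldl_congr_mem
      intro acc i hi
      obtain ⟨hi0, hi1⟩ := (PySem.List.mem_pyRange_one).mp hi
      have hilt : i < (paper.length : Int) := by omega
      have hrow : PySem.List.pyGetD paper i [] = paper[i.toNat] :=
        PySem.List.pyGetD_eq_getElem _ _ hi0 hilt
      rw [hrow, pref_fold]
      apply PySem.List.foldl_congr_mem
      intro acc2 j hj
      obtain ⟨hj0, hj1⟩ := (PySem.List.mem_pyRange_one).mp hj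
      have hmem : paper[i.toNat] ∈ paper.take N.toNat := by
        have hlt : i.toNat < (paper.take N.toNat).length := by
          simp only [List.length_take]
          omega
        have hmm := List.getElem_mem hlt
        rwa [List.getElem_take] at hmm
      have hrlen : M ≤ (paper[i.toNat].length : Int) :=
        hneed (Or.inl (by omega)) _ hmem
      congr 1
      set row := paper[i.toNat] with hrowdef
      have hplen : ((List.range (row.length + 1)).map (fun k => (row.take k).sum)).length
          = row.length + 1 := by simp
      have hg4 : PySem.List.pyGetD ((List.range (row.length + 1)).map (fun k => (row.take k).sum)) (j + 4) 0
          = (row.take ((j + 4).toNat)).sum := by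
        rw [PySem.List.pyGetD_eq_getElem _ _ (by omega) (by rw [hplen]; push_cast; omega)]
        simp
      have hg0 : PySem.List.pyGetD ((List.range (row.length + 1)).map (fun k => (row.take k).sum)) j 0
          = (row.take (j.toNat)).sum := by
        rw [PySem.List.pyGetD_eq_getElem _ _ hj0 (by rw [hplen]; push_cast; omega)]
        simp
      rw [hg4, hg0, show (j + 4).toNat = j.toNat + 4 by omega, window_sum,
          PySem.List.slice_toNat _ hj0 (by omega), show (j + 4).toNat - j.toNat = 4 by omega]
    by_cases h4 : 4 ≤ N
    · rw [hh, if_pos h4,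
          show (PySem.List.pyRange 0 N) = PySem.List.pyRange 0 ((N.toNat : Nat) : Int) by
            rw [Int.toNat_of_nonneg (by omega)],
          col_fold paper M N.toNat (by omega)]
      apply PySem.List.foldl_congr_mem
      intro acc i hi
      obtain ⟨hi0, hi1⟩ := (PySem.List.mem_pyRange_one).mp hi
      apply PySem.List.foldl_congr_mem
      intro acc2 j hj
      obtain ⟨hj0, hj1⟩ := (PySem.List.mem_pyRange_one).mp hj
      congr 1
      have htlen : ((List.range (N.toNat + 1)).map (fun k => (PySem.List.pyRange 0 M).map (fun j' =>
          ((paper.take k).map (fun r => PySem.List.pyGetD r j' 0)).sum))).length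
          = N.toNat + 1 := by simp
      have hc : ∀ t : Int, 0 ≤ t → t ≤ ((N.toNat : Nat) : Int) →
          PySem.List.pyGetD ((List.range (N.toNat + 1)).map (fun k => (PySem.List.pyRange 0 M).map (fun j' =>
            ((paper.take k).map (fun r => PySem.List.pyGetD r j' 0)).sum))) t []
          = (PySem.List.pyRange 0 M).map (fun j' =>
            ((paper.take t.toNat).map (fun r => PySem.List.pyGetD r j' 0)).sum) := by
        intro t ht0 ht1
        rw [PySem.List.pyGetD_eq_getElem _ _ ht0 (by rw [htlen]; push_cast; omega)]
        simp
      rw [hc (i + 4) (by omega) (by omega), hc i hi0 (by omega),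
          PySem.List.pyGetD_map_pyRange_of_nonneg _ M j 0 hj0 hj1,
          PySem.List.pyGetD_map_pyRange_of_nonneg _ M j 0 hj0 hj1,
          show (i + 4).toNat = i.toNat + 4 by omega,
          four_window paper (fun r => PySem.List.pyGetD r j 0) i.toNat (by omega)]
      have hgd : ∀ k : Nat, k < paper.length → ∀ off : Int, off = (k : Int) →
          PySem.List.pyGetD paper off [] = paper.getD k [] := by
        intro k hk off hoff
        rw [hoff, PySem.List.pyGetD_natCast]
      rw [hgd i.toNat (by omega) i (by omega), hgd (i.toNat + 1) (by omega) (i + 1) (by omega),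
          hgd (i.toNat + 2) (by omega) (i + 2) (by omega), hgd (i.toNat + 3) (by omega) (i + 3) (by omega)]
    · rw [hh, if_neg h4, PySem.List.pyRange_one_eq_nil (show N - 3 ≤ 0 by omega),
          List.foldl_nil]
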